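-- pv_equiv track=rewrite | github.com/posl/comment_recommendation | script/mod_gen/2_time/en/113_D/4.py | solve
-- ===== SOURCE A (Python) =====
-- def solve(h, w, k):
--     dp = [[0] * (w + 1) for _ in range(h + 1)]
--     dp[0][1] = 1
--     for i in range(h):
--         for j in range(1, w + 1):
--             if j == 1:
--                 dp[i + 1][j] = dp[i][j] + dp[i][j + 1]
--             elif j == w:
--                 dp[i + 1][j] = dp[i][j - 1] + dp[i][j]
--             else:
--                 dp[i + 1][j] = dp[i][j - 1] + dp[i][j] + dp[i][j + 1]
--     return dp[h][k] % (10 ** 9 + 7)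
-- ===== SOURCE B (Python) =====
-- def solve(h, w, k):
--     # Matrix fast exponentiation: answer row = (transfer matrix)^h applied to e_1, mod p.
--     # In h steps the walk never passes cell h+1, so the matrix is n = min(w, h+1) sized;
--     # cells beyond n always hold 0.
--     p = 10 ** 9 + 7
--     n = min(w, h + 1)
--
--     def matmul(A, B):
--         return [[sum(A[r][t] * B[t][c] for t in range(n)) % p
--                  for c in range(n)] for r in range(n)]
--
--     M = [[1 if abs(r - c) <= 1 else 0 for c in range(n)] for r in range(n)]
--
--     def matpow(e):
--         if e == 0:
--             return [[1 if r == c else 0 for c in range(n)] for r in range(n)]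
--         half = matpow(e // 2)
--         sq = matmul(half, half)
--         return matmul(sq, M) if e % 2 else sq
--
--     P = matpow(h)
--     col0 = [P[r][0] % p for r in range(n)]   # = M^h · e_0
--     full = [0] + col0 + [0] * (w - n)        # 1-based like A's dp row
--     return full[k] % p
-- ===== Notes on version B (the rewrite author's own statement) =====
-- stated objective: alternative
-- what changed: B replaces A's row-by-row DP over h steps by linear algebra: it builds the n-by-n tridiagonal transfer matrix (n = min(w, h+1), since the walk never passes cell h+1), raises it to the h-th power by recursive binary square-and-multiply exponentiation with entries reduced mod 10^9+7, and reads the answer off the k-th component of M^h applied to the initial unit vector.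
import Mathlib
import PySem

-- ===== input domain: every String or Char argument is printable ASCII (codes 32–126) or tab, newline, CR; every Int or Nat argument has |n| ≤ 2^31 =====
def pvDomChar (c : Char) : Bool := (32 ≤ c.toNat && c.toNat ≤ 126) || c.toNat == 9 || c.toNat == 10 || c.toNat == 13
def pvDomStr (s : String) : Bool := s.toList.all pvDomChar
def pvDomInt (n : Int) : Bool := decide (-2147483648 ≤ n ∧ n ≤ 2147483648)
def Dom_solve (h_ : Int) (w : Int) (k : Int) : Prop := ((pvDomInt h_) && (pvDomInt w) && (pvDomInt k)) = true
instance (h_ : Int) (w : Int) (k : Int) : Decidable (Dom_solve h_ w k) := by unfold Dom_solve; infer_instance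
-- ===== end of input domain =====

-- B replaces A's h-step DP table by binary exponentiation of the w×w tridiagonal transfer
-- matrix mod 10^9+7, applied to the initial unit vector.

-- ===== PORT A =====
-- the value assigned to dp[i+1][j] by the inner-loop body (reads only dp[i] = prev)
def pvVal (w : Int) (prev : List Int) (j : Int) : Int :=
  if j = 1 then
    (PySem.List.pyGet? prev j).getD 0 + (PySem.List.pyGet? prev (j + 1)).getD 0
  else if j = w then
    (PySem.List.pyGet? prev (j - 1)).getD 0 + (PySem.List.pyGet? prev j).getD 0
  else
    (PySem.List.pyGet? prev (j - 1)).getD 0 + (PySem.List.pyGet? prev j).getD 0 +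
      (PySem.List.pyGet? prev (j + 1)).getD 0

-- the inner loop: fills row dp[i+1] (initially [0]*(w+1)) from row dp[i] = prev
def pvStepRow (w : Int) (prev : List Int) : List Int :=
  (PySem.List.pyRange 1 (w + 1) 1).foldl
    (fun cur j => cur.set j.toNat (pvVal w prev j))
    (List.replicate (w + 1).toNat 0)

def solve (h_ : Int) (w : Int) (k : Int) : Int :=
  -- dp = [[0]*(w+1) for _ in range(h+1)]; dp[0][1] = 1; rows are produced one by one,
  -- row i+1 reading row i (the Python inner loop only ever reads dp[i] and writes dp[i+1])
  let rows0 : List (List Int) := [(List.replicate (w + 1).toNat 0).set 1 1]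
  let rows := (List.range h_.toNat).foldl
    (fun rows i => rows ++ [pvStepRow w (rows.getD i [])]) rows0
  PySem.Int.mod ((PySem.List.pyGet? ((PySem.List.pyGet? rows h_).getD []) k).getD 0) (10 ^ 9 + 7)

-- ===== PORT B =====
-- matmul(A, B): entrywise sum over t in range(n), reduced mod p
def pvMatMul (n : Nat) (p : Int) (A B : List (List Int)) : List (List Int) :=
  (List.range n).map fun r => (List.range n).map fun c =>
    PySem.Int.mod (((List.range n).map fun t =>
      (A.getD r []).getD t 0 * (B.getD t []).getD c 0).sum) p

-- the identity matrix returned by matpow(0)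
def pvIdMat (n : Nat) : List (List Int) :=
  (List.range n).map fun r => (List.range n).map fun c => if r = c then (1 : Int) else 0

-- M = [[1 if abs(r - c) <= 1 else 0 …]]
def pvTransMat (n : Nat) : List (List Int) :=
  (List.range n).map fun (r : Nat) => (List.range n).map fun (c : Nat) =>
    if ((r : Int) - (c : Int)).natAbs ≤ 1 then (1 : Int) else 0

-- matpow(e): square-and-multiply recursion on e
def pvMatPow (n : Nat) (p : Int) (M : List (List Int)) (e : Nat) : List (List Int) :=
  if h : e = 0 then pvIdMat n
  else
    let half := pvMatPow n p M (e / 2)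
    let sq := pvMatMul n p half half
    if e % 2 = 1 then pvMatMul n p sq M else sq
termination_by e
decreasing_by exact Nat.div_lt_self (Nat.pos_of_ne_zero h) one_lt_two

def solve_alt (h_ : Int) (w : Int) (k : Int) : Int :=
  let p : Int := 10 ^ 9 + 7
  -- in h steps the walk never passes cell h+1, so the matrix is n = min(w, h+1) sized
  let n : Nat := (min w (h_ + 1)).toNat
  let M := pvTransMat n
  let P := pvMatPow n p M h_.toNat
  let col0 := (List.range n).map fun r => PySem.Int.mod ((P.getD r []).getD 0 0) p
  let full := ((0 : Int) :: col0) ++ List.replicate (w - min w (h_ + 1)).toNat 0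
  PySem.Int.mod ((PySem.List.pyGet? full k).getD 0) p

-- ===== PRECONDITION & SPEC =====
-- Pre_ = exactly the inputs on which the Python A returns normally: h ≥ 0 (else dp[0][1]
-- fails on an empty table), w ≥ 1 (dp[0] needs index 1), w ≥ 2 whenever h ≥ 1
-- (the j == 1 branch reads dp[i][2]), and k a valid (possibly negative) index into dp[h].
def Pre_solve (h_ : Int) (w : Int) (k : Int) : Prop :=
  0 ≤ h_ ∧ 1 ≤ w ∧ (1 ≤ h_ → 2 ≤ w) ∧ -(w + 1) ≤ k ∧ k ≤ w
instance (h_ : Int) (w : Int) (k : Int) : Decidable (Pre_solve h_ w k) := by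
  unfold Pre_solve; infer_instance

def pvWitness_solve : Int × Int × Int := (3, 4, 2)

def Spec_solve (h_ : Int) (w : Int) (k : Int) (out : Int) : Prop := out = solve_alt h_ w k
instance (h_ : Int) (w : Int) (k : Int) (out : Int) : Decidable (Spec_solve h_ w k out) := by
  unfold Spec_solve; infer_instance

-- ===== CLAIM (what is proved, stated in full; the proofs are below) =====
def Claim_equal_solve : Prop := ∀ (h_ : Int) (w : Int) (k : Int),
  Dom_solve h_ w k → Pre_solve h_ w k → Spec_solve h_ w k (solve h_ w k)

-- ===== LEMMAS AND PROOFS =====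

-- the transfer matrix over ZMod (10^9+7)
def pvT (w : Int) : Matrix (Fin w.toNat) (Fin w.toNat) (ZMod 1000000007) :=
  Matrix.of fun r c => if ((r : Int) - (c : Int)).natAbs ≤ 1 then 1 else 0

-- the exact dp rows of A, one step at a time
def pvIter (w : Int) : Nat → List Int
  | 0 => (List.replicate (w + 1).toNat 0).set 1 1
  | i + 1 => pvStepRow w (pvIter w i)

-- the ZMod view of an n×n integer matrix given as a list of rows
def pvToZ (n : Nat) (A : List (List Int)) : Matrix (Fin n) (Fin n) (ZMod 1000000007) :=
  Matrix.of fun r c => (((A.getD r.val []).getD c.val 0 : Int) : ZMod 1000000007)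

theorem pv_foldl_set_length (val : Int → Int) (js : List Int) (cur : List Int) :
    (js.foldl (fun c j => c.set j.toNat (val j)) cur).length = cur.length := by
  induction js generalizing cur with
  | nil => rfl
  | cons j js ih => rw [List.foldl_cons, ih]; exact List.length_set ..

theorem pv_foldl_set_getD (val : Int → Int) (js : List Int) (hjs : ∀ j ∈ js, 0 ≤ j)
    (cur : List Int) (m : Nat) :
    (js.foldl (fun c j => c.set j.toNat (val j)) cur).getD m 0 =
      if (m : Int) ∈ js ∧ m < cur.length then val m else cur.getD m 0 := by
  induction js generalizing cur with
  | nil => simp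
  | cons j js ih =>
    rw [List.foldl_cons, ih (fun x hx => hjs x (List.mem_cons_of_mem _ hx)), List.length_set]
    have hj0 : 0 ≤ j := hjs j List.mem_cons_self
    by_cases hlt : m < cur.length
    · by_cases hmem : (m : Int) ∈ js
      · simp [hmem, hlt]
      · by_cases heq : (m : Int) = j
        · have : j.toNat = m := by omega
          simp [hmem, hlt, heq.symm, this, List.getD_eq_getElem?_getD, List.getElem?_set, hlt]
        · have hne : j.toNat ≠ m := by omega
          simp [hmem, hlt, heq, List.getD_eq_getElem?_getD, List.getElem?_set, hne]
    · have h1 : (cur.set j.toNat (val j)).getD m 0 = 0 :=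
        List.getD_eq_default _ _ (by rw [List.length_set]; omega)
      have h2 : cur.getD m 0 = 0 := List.getD_eq_default _ _ (by omega)
      simp [hlt, h1, h2]

theorem pv_stepRow_getD (w : Int) (hw : 0 ≤ w) (prev : List Int) (m : Nat) :
    (pvStepRow w prev).getD m 0 =
      if 1 ≤ m ∧ m ≤ w.toNat then pvVal w prev (m : Int) else 0 := by
  unfold pvStepRow
  rw [pv_foldl_set_getD _ _ (fun j hj => by
    have := PySem.List.mem_pyRange_one.mp hj; omega)]
  rw [List.length_replicate]
  by_cases hc : 1 ≤ m ∧ m ≤ w.toNat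
  · have hmem : (m : Int) ∈ PySem.List.pyRange 1 (w + 1) 1 :=
      PySem.List.mem_pyRange_one.mpr (by omega)
    simp [hmem, hc, show m < (w + 1).toNat by omega]
  · have hmem : ¬ (m : Int) ∈ PySem.List.pyRange 1 (w + 1) 1 := by
      intro hm; have := PySem.List.mem_pyRange_one.mp hm; omega
    simp [hmem, hc, List.getD_eq_getElem?_getD]

theorem pv_T_mulvec (w : Int) (j : Fin w.toNat) (u : ℕ → ZMod 1000000007)
    (hu : ∀ t, w.toNat ≤ t → u t = 0) :
    (∑ t : Fin w.toNat, pvT w j t * u t.val)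
      = (if 1 ≤ j.val then u (j.val - 1) else 0) + u j.val + u (j.val + 1) := by
  have hrw : (∑ t : Fin w.toNat, pvT w j t * u t.val)
      = ∑ s ∈ Finset.range w.toNat,
          (if ((j.val : Int) - (s : Int)).natAbs ≤ 1 then (1 : ZMod 1000000007) else 0) * u s := by
    rw [← Fin.sum_univ_eq_sum_range
      (fun s => (if ((j.val : Int) - (s : Int)).natAbs ≤ 1 then (1 : ZMod 1000000007) else 0) * u s)]
    rfl
  rw [hrw]
  have hsplit : ∀ s ∈ Finset.range w.toNat,
      (if ((j.val : Int) - (s : Int)).natAbs ≤ 1 then (1 : ZMod 1000000007) else 0) * u s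
        = (if 1 ≤ j.val ∧ s = j.val - 1 then u s else 0) + (if s = j.val then u s else 0)
            + (if s = j.val + 1 then u s else 0) := by
    intro s _
    by_cases hcond : ((j.val : Int) - (s : Int)).natAbs ≤ 1
    · rw [if_pos hcond, one_mul]
      have : (1 ≤ j.val ∧ s = j.val - 1) ∨ s = j.val ∨ s = j.val + 1 := by omega
      rcases this with h | h | h
      · rw [if_pos h, if_neg (by omega), if_neg (by omega), add_zero, add_zero]
      · rw [if_neg (by omega), if_pos h, if_neg (by omega), zero_add, add_zero]
      · rw [if_neg (by omega), if_neg (by omega), if_pos h, zero_add, zero_add]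
    · rw [if_neg hcond, zero_mul, if_neg (by omega), if_neg (by omega), if_neg (by omega)]
      simp
  rw [Finset.sum_congr rfl hsplit, Finset.sum_add_distrib, Finset.sum_add_distrib]
  congr 1
  · congr 1
    · by_cases hj : 1 ≤ j.val
      · simp only [hj, true_and]
        rw [Finset.sum_ite_eq' (Finset.range w.toNat) (j.val - 1) u]
        simp [Finset.mem_range.mpr (show j.val - 1 < w.toNat by omega)]
      · simp [hj]
    · rw [Finset.sum_ite_eq' (Finset.range w.toNat) j.val u,
        if_pos (Finset.mem_range.mpr j.isLt)]
  · rw [Finset.sum_ite_eq' (Finset.range w.toNat) (j.val + 1) u]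
    by_cases hend : j.val + 1 < w.toNat
    · rw [if_pos (Finset.mem_range.mpr hend)]
    · rw [if_neg (by simp; omega), hu (j.val + 1) (by omega)]

theorem pv_pyget_natCast_getD (xs : List Int) (n : Nat) :
    (PySem.List.pyGet? xs (n : Int)).getD 0 = xs.getD n 0 := by
  simp [List.getD_eq_getElem?_getD]

theorem pv_iter_length (w : Int) (i : Nat) :
    (pvIter w i).length = (w + 1).toNat := by
  cases i with
  | zero => rw [pvIter, List.length_set, List.length_replicate]
  | succ i => rw [pvIter]; unfold pvStepRow; rw [pv_foldl_set_length]; exact List.length_replicate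

theorem pv_iter_cast (w : Int) (hw : 1 ≤ w) (i : Nat) (t : Fin w.toNat) :
    (((pvIter w i).getD (t.val + 1) 0 : Int) : ZMod 1000000007)
      = (pvT w ^ i) t ⟨0, by omega⟩ := by
  induction i generalizing t with
  | zero =>
    rw [pvIter, pow_zero, Matrix.one_apply, List.getD_eq_getElem?_getD, List.getElem?_set]
    by_cases ht : t.val = 0
    · rw [if_pos (by omega), if_pos (by rw [List.length_replicate]; omega),
        if_pos (by apply Fin.ext; simp [ht])]
      rfl
    · rw [if_neg (by omega), if_neg (by intro hcon; exact ht (by simpa using congrArg Fin.val hcon))]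
      by_cases hl : t.val + 1 < (w + 1).toNat
      · rw [List.getElem?_replicate, if_pos hl]
        rfl
      · rw [List.getElem?_replicate, if_neg hl]
        rfl
  | succ i ih =>
    rw [pvIter, pv_stepRow_getD w (by omega), if_pos (by constructor <;> omega),
      pow_succ', Matrix.mul_apply]
    have hu : ∀ s, w.toNat ≤ s →
        (((pvIter w i).getD (s + 1) 0 : Int) : ZMod 1000000007) = 0 := by
      intro s hs
      have hd : (pvIter w i).getD (s + 1) 0 = 0 :=
        List.getD_eq_default _ _ (by rw [pv_iter_length]; omega)
      rw [hd]; exact Int.cast_zero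
    have hsum : (∑ s, pvT w t s * (pvT w ^ i) s ⟨0, by omega⟩)
        = ∑ s : Fin w.toNat,
            pvT w t s * (fun m => (((pvIter w i).getD (m + 1) 0 : Int) : ZMod 1000000007)) s.val := by
      refine Finset.sum_congr rfl fun s _ => ?_
      show pvT w t s * (pvT w ^ i) s ⟨0, by omega⟩
        = pvT w t s * (((pvIter w i).getD (s.val + 1) 0 : Int) : ZMod 1000000007)
      rw [ih s]
    rw [hsum, pv_T_mulvec w t _ hu]
    have hg : ∀ n : Nat, (PySem.List.pyGet? (pvIter w i) (n : Int)).getD 0 = (pvIter w i).getD n 0 :=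
      fun n => pv_pyget_natCast_getD (pvIter w i) n
    rw [pvVal]
    by_cases ht0 : t.val = 0
    · rw [if_pos (by omega)]
      have e2 : ((t.val + 1 : Nat) : Int) + 1 = ((2 : Nat) : Int) := by omega
      have e1 : ((t.val + 1 : Nat) : Int) = ((1 : Nat) : Int) := by omega
      rw [e2, e1, hg 1, hg 2, if_neg (by omega), ht0]
      push_cast
      ring
    · rw [if_neg (by omega)]
      have em1 : ((t.val + 1 : Nat) : Int) - 1 = ((t.val : Nat) : Int) := by omega
      have em2 : ((t.val + 1 : Nat) : Int) + 1 = ((t.val + 2 : Nat) : Int) := by omega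
      have hsub : t.val - 1 + 1 = t.val := by omega
      by_cases htw : ((t.val + 1 : Nat) : Int) = w
      · rw [if_pos htw, em1, hg t.val, hg (t.val + 1),
          if_pos (by omega), hu (t.val + 1) (by omega), hsub]
        push_cast
        ring
      · rw [if_neg htw, em2, em1, hg t.val, hg (t.val + 1), hg (t.val + 2),
          if_pos (by omega), hsub]
        push_cast
        ring

theorem pv_getD_map_range_int (n : Nat) (f : Nat → Int) (t : Nat) (ht : t < n) :
    ((List.range n).map f).getD t 0 = f t := by
  simp [List.getD_eq_getElem?_getD, List.getElem?_map, List.getElem?_range, ht]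

theorem pv_getD_map_range_list (n : Nat) (f : Nat → List Int) (t : Nat) (ht : t < n) :
    ((List.range n).map f).getD t [] = f t := by
  simp [List.getD_eq_getElem?_getD, List.getElem?_map, List.getElem?_range, ht]

theorem pv_iter_getD_zero (w : Int) (hw : 0 ≤ w) (i : Nat) : (pvIter w i).getD 0 0 = 0 := by
  cases i with
  | zero =>
    rw [pvIter, List.getD_eq_getElem?_getD, List.getElem?_set, if_neg (by omega),
      List.getElem?_replicate]
    split <;> rfl
  | succ i => rw [pvIter, pv_stepRow_getD w hw, if_neg (by omega)]

theorem pv_rows_eq (w : Int) (m : Nat) :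
    (List.range m).foldl (fun rows i => rows ++ [pvStepRow w (rows.getD i [])]) [pvIter w 0]
      = (List.range (m + 1)).map (pvIter w) := by
  induction m with
  | zero => simp
  | succ m ih =>
    rw [List.range_succ, List.foldl_append, ih, List.foldl_cons, List.foldl_nil]
    have hget : ((List.range (m + 1)).map (pvIter w)).getD m [] = pvIter w m := by
      simp [List.getD_eq_getElem?_getD, List.getElem?_map, List.getElem?_range,
        show m < m + 1 by omega]
    rw [hget, show (List.range (m + 1 + 1)) = List.range (m + 1) ++ [m + 1] from List.range_succ,
      List.map_append]
    rfl

theorem pv_mod_eq_of_cast_eq (a b : Int)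
    (h : ((a : Int) : ZMod 1000000007) = ((b : Int) : ZMod 1000000007)) :
    PySem.Int.mod a (10 ^ 9 + 7) = PySem.Int.mod b (10 ^ 9 + 7) := by
  rw [PySem.Int.mod_eq_emod_of_pos (by norm_num), PySem.Int.mod_eq_emod_of_pos (by norm_num)]
  have := (ZMod.intCast_eq_intCast_iff a b 1000000007).mp h
  have h2 : a % ((1000000007 : ℕ) : ℤ) = b % ((1000000007 : ℕ) : ℤ) := this
  norm_num at h2 ⊢
  exact h2

theorem pv_cast_mod (a : Int) :
    ((PySem.Int.mod a (10 ^ 9 + 7) : Int) : ZMod 1000000007) = ((a : Int) : ZMod 1000000007) := by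
  rw [PySem.Int.mod_eq_emod_of_pos (by norm_num),
    show ((10 : Int) ^ 9 + 7) = ((1000000007 : Nat) : Int) by norm_num]
  exact_mod_cast ZMod.intCast_mod a 1000000007

theorem pv_cast_sum (n : Nat) (f : Nat → Int) :
    ((((List.range n).map f).sum : Int) : ZMod 1000000007)
      = ∑ t ∈ Finset.range n, ((f t : Int) : ZMod 1000000007) := by
  induction n with
  | zero => simp
  | succ m ih =>
    rw [List.range_succ, List.map_append, List.sum_append, Finset.sum_range_succ, ← ih]
    push_cast
    simp

theorem pv_matmul_toZ (n : Nat) (A B : List (List Int)) :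
    pvToZ n (pvMatMul n (10 ^ 9 + 7) A B) = pvToZ n A * pvToZ n B := by
  ext r c
  simp only [pvToZ, pvMatMul, Matrix.of_apply, Matrix.mul_apply]
  rw [pv_getD_map_range_list _ _ r.val r.isLt, pv_getD_map_range_int _ _ c.val c.isLt,
    pv_cast_mod, pv_cast_sum,
    ← Fin.sum_univ_eq_sum_range
      (fun t => (((A.getD r.val []).getD t 0 * (B.getD t []).getD c.val 0 : Int)
        : ZMod 1000000007))]
  exact Finset.sum_congr rfl fun t _ => by push_cast; ring

theorem pv_id_toZ (n : Nat) : pvToZ n (pvIdMat n) = 1 := by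
  ext r c
  simp only [pvToZ, pvIdMat, Matrix.of_apply, Matrix.one_apply]
  rw [pv_getD_map_range_list _ _ r.val r.isLt, pv_getD_map_range_int _ _ c.val c.isLt]
  by_cases h : r = c
  · rw [if_pos (congrArg Fin.val h), if_pos h]; exact Int.cast_one
  · rw [if_neg (fun hv => h (Fin.ext hv)), if_neg h]; exact Int.cast_zero

theorem pv_trans_toZ (w : Int) : pvToZ w.toNat (pvTransMat w.toNat) = pvT w := by
  ext r c
  simp only [pvToZ, pvTransMat, pvT, Matrix.of_apply]
  rw [pv_getD_map_range_list _ _ r.val r.isLt, pv_getD_map_range_int _ _ c.val c.isLt]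
  by_cases h : ((r.val : Int) - (c.val : Int)).natAbs ≤ 1
  · rw [if_pos h, if_pos h]; exact Int.cast_one
  · rw [if_neg h, if_neg h]; exact Int.cast_zero

theorem pv_matpow_toZ (n : Nat) (M : List (List Int)) (e : Nat) :
    pvToZ n (pvMatPow n (10 ^ 9 + 7) M e) = (pvToZ n M) ^ e := by
  induction e using Nat.strong_induction_on with
  | _ e ih =>
    rw [pvMatPow]
    by_cases h0 : e = 0
    · rw [dif_pos h0, h0, pow_zero, pv_id_toZ]
    · rw [dif_neg h0]
      show pvToZ n (if e % 2 = 1 then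
          pvMatMul n (10 ^ 9 + 7)
            (pvMatMul n (10 ^ 9 + 7) (pvMatPow n (10 ^ 9 + 7) M (e / 2))
              (pvMatPow n (10 ^ 9 + 7) M (e / 2))) M
        else
          pvMatMul n (10 ^ 9 + 7) (pvMatPow n (10 ^ 9 + 7) M (e / 2))
            (pvMatPow n (10 ^ 9 + 7) M (e / 2))) = (pvToZ n M) ^ e
      have hhalf := ih (e / 2) (Nat.div_lt_self (Nat.pos_of_ne_zero h0) one_lt_two)
      by_cases hodd : e % 2 = 1
      · rw [if_pos hodd, pv_matmul_toZ, pv_matmul_toZ, hhalf, ← pow_add, ← pow_succ]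
        congr 1; omega
      · rw [if_neg hodd, pv_matmul_toZ, hhalf, ← pow_add]
        congr 1; omega

theorem pv_iter_far (w : Int) (hw : 1 ≤ w) : ∀ (i m : Nat), i + 2 ≤ m →
    (pvIter w i).getD m 0 = 0 := by
  intro i
  induction i with
  | zero =>
    intro m hm
    rw [pvIter, List.getD_eq_getElem?_getD, List.getElem?_set, if_neg (by omega),
      List.getElem?_replicate]
    split <;> rfl
  | succ i ih =>
    intro m hm
    rw [pvIter, pv_stepRow_getD w (by omega)]
    by_cases hc : 1 ≤ m ∧ m ≤ w.toNat
    · rw [if_pos hc, pvVal, if_neg (by omega)]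
      have e1 : ((m : Nat) : Int) - 1 = ((m - 1 : Nat) : Int) := by omega
      have e2 : ((m : Nat) : Int) + 1 = ((m + 1 : Nat) : Int) := by omega
      split_ifs with hb
      · rw [e1, pv_pyget_natCast_getD, pv_pyget_natCast_getD,
          ih (m - 1) (by omega), ih m (by omega), add_zero]
      · rw [e1, e2, pv_pyget_natCast_getD, pv_pyget_natCast_getD, pv_pyget_natCast_getD,
          ih (m - 1) (by omega), ih m (by omega), ih (m + 1) (by omega), add_zero, add_zero]
    · rw [if_neg hc]

theorem pv_iter_trunc (w N : Int) (h : Nat) (hNh : N = (h : Int) + 1) (hNw : N ≤ w) :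
    ∀ i, i ≤ h → ∀ m, m ≤ h + 1 →
      (pvIter w i).getD m 0 = (pvIter N i).getD m 0 := by
  intro i
  induction i with
  | zero =>
    intro _ m hm
    rw [pvIter, pvIter, List.getD_eq_getElem?_getD, List.getD_eq_getElem?_getD,
      List.getElem?_set, List.getElem?_set]
    by_cases hm1 : 1 = m
    · rw [if_pos hm1, if_pos hm1, if_pos (by rw [List.length_replicate]; omega),
        if_pos (by rw [List.length_replicate]; omega)]
    · rw [if_neg hm1, if_neg hm1, List.getElem?_replicate, List.getElem?_replicate]
      by_cases hlw : m < (w + 1).toNat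
      · rw [if_pos hlw]
        by_cases hlN : m < (N + 1).toNat
        · rw [if_pos hlN]
        · rw [if_neg hlN]; rfl
      · rw [if_neg hlw, if_neg (by omega)]
  | succ i ih =>
    intro hi m hm
    rw [pvIter, pvIter, pv_stepRow_getD w (by omega), pv_stepRow_getD N (by omega)]
    by_cases hm0 : 1 ≤ m
    · rw [if_pos (by constructor <;> omega), if_pos (by constructor <;> omega)]
      have e1 : ((m : Nat) : Int) - 1 = ((m - 1 : Nat) : Int) := by omega
      have e2 : ((m : Nat) : Int) + 1 = ((m + 1 : Nat) : Int) := by omega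
      rw [pvVal, pvVal]
      by_cases hm1 : ((m : Nat) : Int) = 1
      · rw [if_pos hm1, if_pos hm1, e2, pv_pyget_natCast_getD, pv_pyget_natCast_getD,
          pv_pyget_natCast_getD, pv_pyget_natCast_getD,
          ih (by omega) m (by omega), ih (by omega) (m + 1) (by omega)]
      · rw [if_neg hm1, if_neg hm1]
        by_cases hmw : ((m : Nat) : Int) = w
        · rw [if_pos hmw, if_pos (by omega), e1, pv_pyget_natCast_getD,
            pv_pyget_natCast_getD, pv_pyget_natCast_getD, pv_pyget_natCast_getD,
            ih (by omega) (m - 1) (by omega), ih (by omega) m (by omega)]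
        · rw [if_neg hmw]
          by_cases hmN : ((m : Nat) : Int) = N
          · rw [if_pos hmN, e1, e2, pv_pyget_natCast_getD, pv_pyget_natCast_getD,
              pv_pyget_natCast_getD, pv_pyget_natCast_getD, pv_pyget_natCast_getD,
              ih (by omega) (m - 1) (by omega), ih (by omega) m (by omega),
              pv_iter_far w (by omega) i (m + 1) (by omega), add_zero]
          · rw [if_neg hmN, e1, e2, pv_pyget_natCast_getD, pv_pyget_natCast_getD,
              pv_pyget_natCast_getD, pv_pyget_natCast_getD, pv_pyget_natCast_getD,
              pv_pyget_natCast_getD, ih (by omega) (m - 1) (by omega),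
              ih (by omega) m (by omega), ih (by omega) (m + 1) (by omega)]
    · rw [if_neg (by omega), if_neg (by omega)]

-- ===== VERDICT =====
theorem solve_spec : Claim_equal_solve := by
  intro h_ w k hdom hpre
  obtain ⟨hh, hw, hw2, hk1, hk2⟩ := hpre
  unfold Spec_solve solve solve_alt
  simp only []
  have hn1 : (1 : Int) ≤ min w (h_ + 1) := by omega
  have hrows : (List.range h_.toNat).foldl
      (fun rows i => rows ++ [pvStepRow w (rows.getD i [])])
      [(List.replicate (w + 1).toNat 0).set 1 1]
      = (List.range (h_.toNat + 1)).map (pvIter w) := pv_rows_eq w h_.toNat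
  rw [hrows]
  have hrowA : (PySem.List.pyGet? ((List.range (h_.toNat + 1)).map (pvIter w)) h_).getD []
      = pvIter w h_.toNat := by
    rw [show h_ = ((h_.toNat : Nat) : Int) by omega, PySem.List.pyGet?_natCast]
    simp [show h_.toNat < h_.toNat + 1 by omega]
    congr 1
    omega
  rw [hrowA]
  set rowA := pvIter w h_.toNat with hrowAdef
  set N := min w (h_ + 1) with hNdef
  set P := pvMatPow N.toNat (10 ^ 9 + 7) (pvTransMat N.toNat) h_.toNat with hPdef
  set col0 := (List.range N.toNat).map
      (fun r => PySem.Int.mod ((P.getD r []).getD 0 0) (10 ^ 9 + 7)) with hcol0def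
  set rowB := (((0 : Int) :: col0) ++ List.replicate (w - N).toNat 0) with hrowBdef
  have hlen1 : ((0 : Int) :: col0).length = N.toNat + 1 := by
    rw [List.length_cons, hcol0def, List.length_map, List.length_range]
  have hlenA : rowA.length = w.toNat + 1 := by
    rw [hrowAdef, pv_iter_length]; omega
  have hlenB : rowB.length = w.toNat + 1 := by
    rw [hrowBdef, List.length_append, hlen1, List.length_replicate]
    omega
  have hPcast : ∀ t : Fin N.toNat,
      (((P.getD t.val []).getD 0 0 : Int) : ZMod 1000000007)
        = (pvT N ^ h_.toNat) t ⟨0, by omega⟩ := by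
    intro t
    have : (((P.getD t.val []).getD 0 0 : Int) : ZMod 1000000007)
        = pvToZ N.toNat P t ⟨0, by omega⟩ := rfl
    rw [this, hPdef, pv_matpow_toZ, pv_trans_toZ]
  have hentry : ∀ m : Nat, m < w.toNat + 1 →
      PySem.Int.mod (rowA.getD m 0) (10 ^ 9 + 7)
        = PySem.Int.mod (rowB.getD m 0) (10 ^ 9 + 7) := by
    intro m hm
    match m with
    | 0 =>
      rw [pv_iter_getD_zero w (by omega), hrowBdef,
        List.getD_eq_getElem?_getD, List.getElem?_append_left (by rw [hlen1]; omega)]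
      rfl
    | Nat.succ t =>
      by_cases htn : t < N.toNat
      · have hBn : rowB.getD (t + 1) 0
            = PySem.Int.mod ((P.getD t []).getD 0 0) (10 ^ 9 + 7) := by
          rw [hrowBdef, List.getD_eq_getElem?_getD,
            List.getElem?_append_left (by rw [hlen1]; omega),
            ← List.getD_eq_getElem?_getD, List.getD_cons_succ, hcol0def,
            pv_getD_map_range_int _ _ t htn]
        have hAn : rowA.getD (t + 1) 0 = (pvIter N h_.toNat).getD (t + 1) 0 := by
          by_cases hcase : w ≤ h_ + 1
          · rw [hrowAdef, hNdef, show min w (h_ + 1) = w by omega]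
          · exact pv_iter_trunc w N h_.toNat (by omega) (by omega)
              h_.toNat (le_refl _) (t + 1) (by omega)
        rw [hBn]
        apply pv_mod_eq_of_cast_eq
        rw [pv_cast_mod, hPcast ⟨t, htn⟩, hAn]
        exact pv_iter_cast N hn1 h_.toNat ⟨t, htn⟩
      · have hA0 : rowA.getD (t + 1) 0 = 0 :=
          pv_iter_far w (by omega) h_.toNat (t + 1) (by omega)
        have hB0 : rowB.getD (t + 1) 0 = 0 := by
          rw [hrowBdef, List.getD_eq_getElem?_getD,
            List.getElem?_append_right (by rw [hlen1]; omega), List.getElem?_replicate]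
          split <;> rfl
        rw [hA0, hB0]
  by_cases hk0 : 0 ≤ k
  · have hkA := PySem.List.pyGet?_of_nonneg (xs := rowA) hk0
    have hkB := PySem.List.pyGet?_of_nonneg (xs := rowB) hk0
    rw [hkA, hkB]
    have hkn : k.toNat < w.toNat + 1 := by omega
    rw [← List.getD_eq_getElem?_getD, ← List.getD_eq_getElem?_getD]
    exact hentry k.toNat hkn
  · have hm : 0 < (-k).toNat := by omega
    have hkeq : k = -((((-k).toNat : Nat)) : Int) := by omega
    rw [hkeq, PySem.List.pyGet?_neg_natCast rowA (-k).toNat hm (by rw [hlenA]; omega),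
      PySem.List.pyGet?_neg_natCast rowB (-k).toNat hm (by rw [hlenB]; omega), hlenA, hlenB,
      ← List.getD_eq_getElem?_getD, ← List.getD_eq_getElem?_getD]
    exact hentry (w.toNat + 1 - (-k).toNat) (by omega)
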